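-- pv_equiv track=rewrite | github.com/vamsiaraveti07/AI-Based-Smart-Feedback-and-Complaint-Management-System-with-Sentiment-Prioritization | final.py | _generate_auto_tags
-- ===== SOURCE A (Python) =====
-- def _generate_auto_tags(processed_text: str, primary_category: str) -> list:
--     """Generate automatic tags based on content analysis"""
--
--     tags = []
--
--     # Category-specific tag generation
--     if primary_category == 'Academic':
--         academic_tags = ['course_issue', 'grading', 'faculty', 'curriculum', 'examination']
--         for tag in academic_tags:
--             if any(keyword in processed_text for keyword in tag.split('_')):
--                 tags.append(tag)
--
--     elif primary_category == 'Hostel':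
--         hostel_tags = ['maintenance', 'facility', 'security', 'cleaning', 'utilities']
--         for tag in hostel_tags:
--             if tag in processed_text:
--                 tags.append(tag)
--
--     elif primary_category == 'Infrastructure':
--         infra_tags = ['building', 'equipment', 'safety', 'accessibility', 'maintenance']
--         for tag in infra_tags:
--             if tag in processed_text:
--                 tags.append(tag)
--
--     elif primary_category == 'Administration':
--         admin_tags = ['policy', 'procedure', 'documentation', 'approval', 'deadline']
--         for tag in admin_tags:
--             if tag in processed_text:
--                 tags.append(tag)
--
--     # Universal tags based on content
--     if any(word in processed_text for word in ['urgent', 'immediate', 'asap', 'critical']):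
--         tags.append('urgent')
--
--     if any(word in processed_text for word in ['complaint', 'dissatisfied', 'unhappy', 'problem']):
--         tags.append('complaint')
--
--     if any(word in processed_text for word in ['request', 'please', 'need', 'require']):
--         tags.append('request')
--
--     if any(word in processed_text for word in ['suggestion', 'improvement', 'better', 'enhance']):
--         tags.append('suggestion')
--
--     # Time-based tags
--     if any(word in processed_text for word in ['deadline', 'due', 'time', 'schedule']):
--         tags.append('time_sensitive')
--
--     # Financial tags
--     if any(word in processed_text for word in ['money', 'cost', 'fee', 'payment', 'refund']):
--         tags.append('financial')
--
--     return tags[:8]  # Limit to 8 most relevant tags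
-- ===== SOURCE B (Python) =====
-- # Inverted-index strategy: scan (keyword -> tag) pairs once to build the SET of
-- # hit tags, then emit tags in their canonical priority order, stopping at 8.
--
-- CATEGORY_KEYWORDS = {
--     'Academic': [('course', 'course_issue'), ('issue', 'course_issue'),
--                  ('grading', 'grading'), ('faculty', 'faculty'),
--                  ('curriculum', 'curriculum'), ('examination', 'examination')],
--     'Hostel': [(t, t) for t in ('maintenance', 'facility', 'security', 'cleaning', 'utilities')],
--     'Infrastructure': [(t, t) for t in ('building', 'equipment', 'safety', 'accessibility', 'maintenance')],
--     'Administration': [(t, t) for t in ('policy', 'procedure', 'documentation', 'approval', 'deadline')],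
-- }
--
-- CATEGORY_TAG_ORDER = {
--     'Academic': ['course_issue', 'grading', 'faculty', 'curriculum', 'examination'],
--     'Hostel': ['maintenance', 'facility', 'security', 'cleaning', 'utilities'],
--     'Infrastructure': ['building', 'equipment', 'safety', 'accessibility', 'maintenance'],
--     'Administration': ['policy', 'procedure', 'documentation', 'approval', 'deadline'],
-- }
--
-- UNIVERSAL_KEYWORDS = [
--     ('urgent', 'urgent'), ('immediate', 'urgent'), ('asap', 'urgent'), ('critical', 'urgent'),
--     ('complaint', 'complaint'), ('dissatisfied', 'complaint'), ('unhappy', 'complaint'), ('problem', 'complaint'),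
--     ('request', 'request'), ('please', 'request'), ('need', 'request'), ('require', 'request'),
--     ('suggestion', 'suggestion'), ('improvement', 'suggestion'), ('better', 'suggestion'), ('enhance', 'suggestion'),
--     ('deadline', 'time_sensitive'), ('due', 'time_sensitive'), ('time', 'time_sensitive'), ('schedule', 'time_sensitive'),
--     ('money', 'financial'), ('cost', 'financial'), ('fee', 'financial'), ('payment', 'financial'), ('refund', 'financial'),
-- ]
--
-- UNIVERSAL_TAG_ORDER = ['urgent', 'complaint', 'request', 'suggestion', 'time_sensitive', 'financial']
--
--
-- def _generate_auto_tags(processed_text: str, primary_category: str) -> list: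
--     pairs = CATEGORY_KEYWORDS.get(primary_category, []) + UNIVERSAL_KEYWORDS
--     hit = {tag for kw, tag in pairs if kw in processed_text}
--     order = CATEGORY_TAG_ORDER.get(primary_category, []) + UNIVERSAL_TAG_ORDER
--     tags = []
--     for t in order:
--         if len(tags) == 8:
--             break
--         if t in hit:
--             tags.append(t)
--     return tags
-- ===== Notes on version B (the rewrite author's own statement) =====
-- stated objective: alternative
-- what changed: Inverted the tag-major branch chain into a keyword-major inverted index: one pass over flat (keyword, tag) pairs builds the SET of hit tags, then a second pass emits tags in a canonical priority order with an early break at 8, instead of per-tag any()-checks appended branch by branch and a final [:8] slice.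
import Mathlib
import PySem

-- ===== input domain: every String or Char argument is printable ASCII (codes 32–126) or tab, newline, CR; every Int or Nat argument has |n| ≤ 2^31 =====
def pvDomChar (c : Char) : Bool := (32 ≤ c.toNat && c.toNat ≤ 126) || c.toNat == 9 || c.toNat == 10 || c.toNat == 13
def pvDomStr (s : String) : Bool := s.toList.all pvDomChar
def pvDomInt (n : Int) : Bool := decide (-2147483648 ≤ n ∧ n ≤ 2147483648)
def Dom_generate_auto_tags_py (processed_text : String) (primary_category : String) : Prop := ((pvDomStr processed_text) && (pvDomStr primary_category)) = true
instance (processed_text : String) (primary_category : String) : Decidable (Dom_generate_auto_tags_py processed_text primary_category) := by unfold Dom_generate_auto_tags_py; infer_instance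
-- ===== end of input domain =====

-- B inverts A's tag-major if/elif chain into a keyword-major pass: one scan of flat
-- (keyword, tag) pairs builds the set of hit tags, then tags are emitted in canonical
-- priority order with an early break at 8; objective: alternative, same cost.

-- ===== PORT A =====
-- literal transliteration of A: each for-loop is a foldl over the same tag list,
-- appending to the accumulator under the same condition; tags[:8] is PySem.List.slice.
-- tag.split('_') is PySem.Str.split?, exact here since the separator "_" is nonempty (getD [] never fires).
def generate_auto_tags_py (processed_text : String) (primary_category : String) : List String :=
  let tags : List String := []
  let tags :=
    if primary_category == "Academic" then
      ["course_issue", "grading", "faculty", "curriculum", "examination"].foldl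
        (fun acc tag =>
          if ((PySem.Str.split? tag "_").getD []).any (fun keyword => PySem.Str.isIn keyword processed_text)
          then acc ++ [tag] else acc) tags
    else if primary_category == "Hostel" then
      ["maintenance", "facility", "security", "cleaning", "utilities"].foldl
        (fun acc tag => if PySem.Str.isIn tag processed_text then acc ++ [tag] else acc) tags
    else if primary_category == "Infrastructure" then
      ["building", "equipment", "safety", "accessibility", "maintenance"].foldl
        (fun acc tag => if PySem.Str.isIn tag processed_text then acc ++ [tag] else acc) tags
    else if primary_category == "Administration" then
      ["policy", "procedure", "documentation", "approval", "deadline"].foldl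
        (fun acc tag => if PySem.Str.isIn tag processed_text then acc ++ [tag] else acc) tags
    else tags
  let tags := if ["urgent", "immediate", "asap", "critical"].any (fun w => PySem.Str.isIn w processed_text) then tags ++ ["urgent"] else tags
  let tags := if ["complaint", "dissatisfied", "unhappy", "problem"].any (fun w => PySem.Str.isIn w processed_text) then tags ++ ["complaint"] else tags
  let tags := if ["request", "please", "need", "require"].any (fun w => PySem.Str.isIn w processed_text) then tags ++ ["request"] else tags
  let tags := if ["suggestion", "improvement", "better", "enhance"].any (fun w => PySem.Str.isIn w processed_text) then tags ++ ["suggestion"] else tags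
  let tags := if ["deadline", "due", "time", "schedule"].any (fun w => PySem.Str.isIn w processed_text) then tags ++ ["time_sensitive"] else tags
  let tags := if ["money", "cost", "fee", "payment", "refund"].any (fun w => PySem.Str.isIn w processed_text) then tags ++ ["financial"] else tags
  PySem.List.slice tags none (some 8)

-- ===== PORT B =====
-- the tables of Source B (dicts → association lists, in insertion order)
def pvCategoryKeywords : PySem.Dict String (List (String × String)) :=
  PySem.Dict.mk
  [ ("Academic",
      [("course", "course_issue"), ("issue", "course_issue"), ("grading", "grading"),
       ("faculty", "faculty"), ("curriculum", "curriculum"), ("examination", "examination")]),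
    ("Hostel",
      [("maintenance", "maintenance"), ("facility", "facility"), ("security", "security"),
       ("cleaning", "cleaning"), ("utilities", "utilities")]),
    ("Infrastructure",
      [("building", "building"), ("equipment", "equipment"), ("safety", "safety"),
       ("accessibility", "accessibility"), ("maintenance", "maintenance")]),
    ("Administration",
      [("policy", "policy"), ("procedure", "procedure"), ("documentation", "documentation"),
       ("approval", "approval"), ("deadline", "deadline")]) ]

def pvCategoryTagOrder : PySem.Dict String (List String) :=
  PySem.Dict.mk
  [ ("Academic", ["course_issue", "grading", "faculty", "curriculum", "examination"]),
    ("Hostel", ["maintenance", "facility", "security", "cleaning", "utilities"]),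
    ("Infrastructure", ["building", "equipment", "safety", "accessibility", "maintenance"]),
    ("Administration", ["policy", "procedure", "documentation", "approval", "deadline"]) ]

def pvUniversalKeywords : List (String × String) :=
  [ ("urgent", "urgent"), ("immediate", "urgent"), ("asap", "urgent"), ("critical", "urgent"),
    ("complaint", "complaint"), ("dissatisfied", "complaint"), ("unhappy", "complaint"), ("problem", "complaint"),
    ("request", "request"), ("please", "request"), ("need", "request"), ("require", "request"),
    ("suggestion", "suggestion"), ("improvement", "suggestion"), ("better", "suggestion"), ("enhance", "suggestion"),
    ("deadline", "time_sensitive"), ("due", "time_sensitive"), ("time", "time_sensitive"), ("schedule", "time_sensitive"),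
    ("money", "financial"), ("cost", "financial"), ("fee", "financial"), ("payment", "financial"), ("refund", "financial") ]

def pvUniversalTagOrder : List String :=
  ["urgent", "complaint", "request", "suggestion", "time_sensitive", "financial"]

-- Source B's emission loop: 'for t in order: if len(tags)==8: break; if t in hit: tags.append(t)'
def pvEmit (hit : PySem.Set String) (tags : List String) : List String → List String
  | [] => tags
  | t :: rest =>
      if tags.length == 8 then tags
      else if PySem.Set.contains hit t then pvEmit hit (tags ++ [t]) rest
      else pvEmit hit tags rest

def generate_auto_tags_py_alt (processed_text : String) (primary_category : String) : List String :=
  let pairs := PySem.Dict.getD pvCategoryKeywords primary_category [] ++ pvUniversalKeywords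
  -- the set comprehension: set of tags of the pairs whose keyword occurs in the text
  let hit : PySem.Set String :=
    PySem.Set.ofList ((pairs.filter (fun p => PySem.Str.isIn p.1 processed_text)).map Prod.snd)
  let order := PySem.Dict.getD pvCategoryTagOrder primary_category [] ++ pvUniversalTagOrder
  pvEmit hit [] order

-- ===== PRECONDITION & SPEC =====
def Spec_generate_auto_tags_py (processed_text : String) (primary_category : String) (out : List String) : Prop := out = generate_auto_tags_py_alt processed_text primary_category
instance (processed_text : String) (primary_category : String) (out : List String) : Decidable (Spec_generate_auto_tags_py processed_text primary_category out) := by unfold Spec_generate_auto_tags_py; infer_instance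

-- ===== CLAIM (what is proved, stated in full; the proofs are below) =====
def Claim_equal_generate_auto_tags_py : Prop := ∀ (processed_text : String) (primary_category : String), Dom_generate_auto_tags_py processed_text primary_category → Spec_generate_auto_tags_py processed_text primary_category (generate_auto_tags_py processed_text primary_category)

-- ===== LEMMAS AND PROOFS =====

-- proof-only decomposition of port A's body: the category if/elif chain …
def pvCatPart (processed_text : String) (primary_category : String) : List String :=
  if primary_category == "Academic" then
    ["course_issue", "grading", "faculty", "curriculum", "examination"].foldl
      (fun acc tag =>
        if ((PySem.Str.split? tag "_").getD []).any (fun keyword => PySem.Str.isIn keyword processed_text)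
        then acc ++ [tag] else acc) []
  else if primary_category == "Hostel" then
    ["maintenance", "facility", "security", "cleaning", "utilities"].foldl
      (fun acc tag => if PySem.Str.isIn tag processed_text then acc ++ [tag] else acc) []
  else if primary_category == "Infrastructure" then
    ["building", "equipment", "safety", "accessibility", "maintenance"].foldl
      (fun acc tag => if PySem.Str.isIn tag processed_text then acc ++ [tag] else acc) []
  else if primary_category == "Administration" then
    ["policy", "procedure", "documentation", "approval", "deadline"].foldl
      (fun acc tag => if PySem.Str.isIn tag processed_text then acc ++ [tag] else acc) []
  else []

-- … and the six universal if-blocks, over an arbitrary accumulator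
def pvUnivStep (processed_text : String) (acc : List String) : List String :=
  let tags := if ["urgent", "immediate", "asap", "critical"].any (fun w => PySem.Str.isIn w processed_text) then acc ++ ["urgent"] else acc
  let tags := if ["complaint", "dissatisfied", "unhappy", "problem"].any (fun w => PySem.Str.isIn w processed_text) then tags ++ ["complaint"] else tags
  let tags := if ["request", "please", "need", "require"].any (fun w => PySem.Str.isIn w processed_text) then tags ++ ["request"] else tags
  let tags := if ["suggestion", "improvement", "better", "enhance"].any (fun w => PySem.Str.isIn w processed_text) then tags ++ ["suggestion"] else tags
  let tags := if ["deadline", "due", "time", "schedule"].any (fun w => PySem.Str.isIn w processed_text) then tags ++ ["time_sensitive"] else tags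
  let tags := if ["money", "cost", "fee", "payment", "refund"].any (fun w => PySem.Str.isIn w processed_text) then tags ++ ["financial"] else tags
  tags

-- A's rule tables (proof-only, for stating A's result as one filter)
def pvCategoryRules : PySem.Dict String (List (String × List String)) :=
  PySem.Dict.mk
  [ ("Academic",
      [("course_issue", ["course", "issue"]), ("grading", ["grading"]), ("faculty", ["faculty"]),
       ("curriculum", ["curriculum"]), ("examination", ["examination"])]),
    ("Hostel",
      [("maintenance", ["maintenance"]), ("facility", ["facility"]), ("security", ["security"]),
       ("cleaning", ["cleaning"]), ("utilities", ["utilities"])]),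
    ("Infrastructure",
      [("building", ["building"]), ("equipment", ["equipment"]), ("safety", ["safety"]),
       ("accessibility", ["accessibility"]), ("maintenance", ["maintenance"])]),
    ("Administration",
      [("policy", ["policy"]), ("procedure", ["procedure"]), ("documentation", ["documentation"]),
       ("approval", ["approval"]), ("deadline", ["deadline"])]) ]

def pvUniversalRules : List (String × List String) :=
  [ ("urgent", ["urgent", "immediate", "asap", "critical"]),
    ("complaint", ["complaint", "dissatisfied", "unhappy", "problem"]),
    ("request", ["request", "please", "need", "require"]),
    ("suggestion", ["suggestion", "improvement", "better", "enhance"]),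
    ("time_sensitive", ["deadline", "due", "time", "schedule"]),
    ("financial", ["money", "cost", "fee", "payment", "refund"]) ]

def pvRulesA (cat : String) : List (String × List String) :=
  PySem.Dict.getD pvCategoryRules cat [] ++ pvUniversalRules

def pvHit (pt : String) : (String × List String) → Bool :=
  fun r => r.2.any (fun k => PySem.Str.isIn k pt)

lemma pvA_decomp (pt cat : String) :
    generate_auto_tags_py pt cat
      = PySem.List.slice (pvUnivStep pt (pvCatPart pt cat)) none (some 8) := rfl

lemma pvUnivStep_eq (pt : String) (acc : List String) :
    pvUnivStep pt acc = acc ++ (pvUniversalRules.filter (pvHit pt)).map (fun r => r.1) := by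
  unfold pvUnivStep pvUniversalRules pvHit
  simp only [List.filter_cons, List.filter_nil, List.any_cons, List.any_nil]
  split_ifs <;> simp

lemma pvCatPart_eq (pt cat : String) :
    pvCatPart pt cat
      = ((PySem.Dict.getD pvCategoryRules cat []).filter (pvHit pt)).map (fun r => r.1) := by
  unfold pvCatPart
  by_cases h1 : cat = "Academic"
  · subst h1
    rw [show PySem.Dict.getD pvCategoryRules "Academic" [] =
        [("course_issue", ["course", "issue"]), ("grading", ["grading"]), ("faculty", ["faculty"]),
         ("curriculum", ["curriculum"]), ("examination", ["examination"])] from rfl]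
    simp only [beq_self_eq_true, if_true]
    rw [PySem.List.foldl_append_if_eq_filter]
    simp only [pvHit, List.filter_cons, List.filter_nil, List.any_cons, List.any_nil,
      show ((PySem.Str.split? "course_issue" "_").getD []) = ["course", "issue"] from rfl,
      show ((PySem.Str.split? "grading" "_").getD []) = ["grading"] from rfl,
      show ((PySem.Str.split? "faculty" "_").getD []) = ["faculty"] from rfl,
      show ((PySem.Str.split? "curriculum" "_").getD []) = ["curriculum"] from rfl,
      show ((PySem.Str.split? "examination" "_").getD []) = ["examination"] from rfl]
    split_ifs <;> simp
  · by_cases h2 : cat = "Hostel"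
    · subst h2
      rw [show PySem.Dict.getD pvCategoryRules "Hostel" [] =
          [("maintenance", ["maintenance"]), ("facility", ["facility"]), ("security", ["security"]),
           ("cleaning", ["cleaning"]), ("utilities", ["utilities"])] from rfl]
      simp only [show (("Hostel" : String) == "Academic") = false from rfl, Bool.false_eq_true,
        if_false, beq_self_eq_true, if_true]
      rw [PySem.List.foldl_append_if_eq_filter]
      simp only [pvHit, List.filter_cons, List.filter_nil, List.any_cons, List.any_nil,
        Bool.or_false]
      split_ifs <;> simp
    · by_cases h3 : cat = "Infrastructure"
      · subst h3
        rw [show PySem.Dict.getD pvCategoryRules "Infrastructure" [] =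
            [("building", ["building"]), ("equipment", ["equipment"]), ("safety", ["safety"]),
             ("accessibility", ["accessibility"]), ("maintenance", ["maintenance"])] from rfl]
        simp only [show (("Infrastructure" : String) == "Academic") = false from rfl,
          show (("Infrastructure" : String) == "Hostel") = false from rfl, Bool.false_eq_true,
          if_false, beq_self_eq_true, if_true]
        rw [PySem.List.foldl_append_if_eq_filter]
        simp only [pvHit, List.filter_cons, List.filter_nil, List.any_cons, List.any_nil,
          Bool.or_false]
        split_ifs <;> simp
      · by_cases h4 : cat = "Administration"
        · subst h4
          rw [show PySem.Dict.getD pvCategoryRules "Administration" [] =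
              [("policy", ["policy"]), ("procedure", ["procedure"]),
               ("documentation", ["documentation"]), ("approval", ["approval"]),
               ("deadline", ["deadline"])] from rfl]
          simp only [show (("Administration" : String) == "Academic") = false from rfl,
            show (("Administration" : String) == "Hostel") = false from rfl,
            show (("Administration" : String) == "Infrastructure") = false from rfl,
            Bool.false_eq_true, if_false, beq_self_eq_true, if_true]
          rw [PySem.List.foldl_append_if_eq_filter]
          simp only [pvHit, List.filter_cons, List.filter_nil, List.any_cons, List.any_nil,
            Bool.or_false]
          split_ifs <;> simp
        · have hget : PySem.Dict.getD pvCategoryRules cat [] = [] := by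
            simp [pvCategoryRules, PySem.Dict.getD, PySem.Dict.get?,
              beq_eq_false_iff_ne.mpr (Ne.symm h1), beq_eq_false_iff_ne.mpr (Ne.symm h2),
              beq_eq_false_iff_ne.mpr (Ne.symm h3), beq_eq_false_iff_ne.mpr (Ne.symm h4)]
          simp [beq_eq_false_iff_ne.mpr h1, beq_eq_false_iff_ne.mpr h2,
            beq_eq_false_iff_ne.mpr h3, beq_eq_false_iff_ne.mpr h4, hget]

-- A's result is the first 8 tags of the rules whose keyword list hits
lemma pvA_eq (pt cat : String) :
    generate_auto_tags_py pt cat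
      = (((pvRulesA cat).filter (pvHit pt)).map Prod.fst).take 8 := by
  rw [pvA_decomp, pvUnivStep_eq, pvCatPart_eq]
  have h8 : (8 : Int) = ((8 : Nat) : Int) := rfl
  rw [h8, PySem.List.slice_to_natCast]
  simp [pvRulesA, List.filter_append]

-- the emission loop is 'take 8 after appending the hit-filtered order'
lemma pvEmit_eq (hit : PySem.Set String) (order tags : List String) (h : tags.length ≤ 8) :
    pvEmit hit tags order
      = (tags ++ order.filter (fun t => PySem.Set.contains hit t)).take 8 := by
  induction order generalizing tags with
  | nil => simp [pvEmit, List.take_of_length_le h]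
  | cons t rest ih =>
    unfold pvEmit
    by_cases h8 : tags.length = 8
    · simp only [h8, beq_self_eq_true, if_true]
      rw [List.take_append_of_le_length (by omega), List.take_of_length_le (by omega)]
    · simp only [show (tags.length == 8) = false from by simp [h8], Bool.false_eq_true, if_false,
        List.filter_cons]
      by_cases hc : PySem.Set.contains hit t = true
      · simp only [hc, if_true, ih (tags ++ [t]) (by simp; omega), List.append_assoc,
          List.singleton_append]
      · simp only [hc, ih tags h]
        simp at hc
        simp [hc]

-- membership in Source B's hit set = 'some keyword of the rule with that tag occurs',
-- for each rule of each category's combined rule list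
lemma pvHitSet_cond (pt cat : String) :
    ∀ r ∈ pvRulesA cat,
      PySem.Set.contains
        (PySem.Set.ofList
          (((PySem.Dict.getD pvCategoryKeywords cat [] ++ pvUniversalKeywords).filter
              (fun p => PySem.Str.isIn p.1 pt)).map Prod.snd)) r.1
        = pvHit pt r := by
  have key : ∀ (pairs : List (String × String)) (t : String),
      PySem.Set.contains
        (PySem.Set.ofList ((pairs.filter (fun p => PySem.Str.isIn p.1 pt)).map Prod.snd)) t
        = pairs.any (fun p => p.2 == t && PySem.Str.isIn p.1 pt) := by
    intro pairs t
    rw [Bool.eq_iff_iff, PySem.Set.contains_iff, PySem.Set.mem_ofList]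
    simp only [List.mem_map, List.mem_filter, List.any_eq_true, Bool.and_eq_true, beq_iff_eq]
    constructor
    · rintro ⟨p, ⟨hp, hin⟩, ht⟩; exact ⟨p, hp, ht, hin⟩
    · rintro ⟨p, hp, ht, hin⟩; exact ⟨p, ⟨hp, hin⟩, ht⟩
  intro r hr
  unfold pvHit
  rw [key]
  by_cases h1 : cat = "Academic"
  · subst h1
    rw [show pvRulesA "Academic" =
        [("course_issue", ["course", "issue"]), ("grading", ["grading"]), ("faculty", ["faculty"]),
         ("curriculum", ["curriculum"]), ("examination", ["examination"])] ++ pvUniversalRules from rfl,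
      pvUniversalRules] at hr
    simp only [List.mem_append, List.mem_cons, List.not_mem_nil, or_false] at hr
    rcases hr with ((hr | hr | hr | hr | hr) | (hr | hr | hr | hr | hr | hr)) <;> subst hr <;>
      simp [pvCategoryKeywords, pvUniversalKeywords, PySem.Dict.getD, PySem.Dict.get?]
  · by_cases h2 : cat = "Hostel"
    · subst h2
      rw [show pvRulesA "Hostel" =
          [("maintenance", ["maintenance"]), ("facility", ["facility"]), ("security", ["security"]),
           ("cleaning", ["cleaning"]), ("utilities", ["utilities"])] ++ pvUniversalRules from rfl,
        pvUniversalRules] at hr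
      simp only [List.mem_append, List.mem_cons, List.not_mem_nil, or_false] at hr
      rcases hr with ((hr | hr | hr | hr | hr) | (hr | hr | hr | hr | hr | hr)) <;> subst hr <;>
        simp [pvCategoryKeywords, pvUniversalKeywords, PySem.Dict.getD, PySem.Dict.get?]
    · by_cases h3 : cat = "Infrastructure"
      · subst h3
        rw [show pvRulesA "Infrastructure" =
            [("building", ["building"]), ("equipment", ["equipment"]), ("safety", ["safety"]),
             ("accessibility", ["accessibility"]), ("maintenance", ["maintenance"])] ++ pvUniversalRules from rfl,
          pvUniversalRules] at hr
        simp only [List.mem_append, List.mem_cons, List.not_mem_nil, or_false] at hr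
        rcases hr with ((hr | hr | hr | hr | hr) | (hr | hr | hr | hr | hr | hr)) <;> subst hr <;>
          simp [pvCategoryKeywords, pvUniversalKeywords, PySem.Dict.getD, PySem.Dict.get?]
      · by_cases h4 : cat = "Administration"
        · subst h4
          rw [show pvRulesA "Administration" =
              [("policy", ["policy"]), ("procedure", ["procedure"]),
               ("documentation", ["documentation"]), ("approval", ["approval"]),
               ("deadline", ["deadline"])] ++ pvUniversalRules from rfl,
            pvUniversalRules] at hr
          simp only [List.mem_append, List.mem_cons, List.not_mem_nil, or_false] at hr
          rcases hr with ((hr | hr | hr | hr | hr) | (hr | hr | hr | hr | hr | hr)) <;> subst hr <;>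
            simp [pvCategoryKeywords, pvUniversalKeywords, PySem.Dict.getD, PySem.Dict.get?]
        · have hgetA : PySem.Dict.getD pvCategoryRules cat [] = [] := by
            simp [pvCategoryRules, PySem.Dict.getD, PySem.Dict.get?,
              beq_eq_false_iff_ne.mpr (Ne.symm h1), beq_eq_false_iff_ne.mpr (Ne.symm h2),
              beq_eq_false_iff_ne.mpr (Ne.symm h3), beq_eq_false_iff_ne.mpr (Ne.symm h4)]
          have hgetK : PySem.Dict.getD pvCategoryKeywords cat [] = [] := by
            simp [pvCategoryKeywords, PySem.Dict.getD, PySem.Dict.get?,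
              beq_eq_false_iff_ne.mpr (Ne.symm h1), beq_eq_false_iff_ne.mpr (Ne.symm h2),
              beq_eq_false_iff_ne.mpr (Ne.symm h3), beq_eq_false_iff_ne.mpr (Ne.symm h4)]
          rw [pvRulesA, hgetA, List.nil_append, pvUniversalRules] at hr
          rw [hgetK, List.nil_append]
          simp only [List.mem_cons, List.not_mem_nil, or_false] at hr
          rcases hr with hr | hr | hr | hr | hr | hr <;> subst hr <;>
            simp [pvUniversalKeywords]

-- Source B's emission order list is exactly the tags of A's rule list, in order
lemma pvOrder_eq (cat : String) :
    PySem.Dict.getD pvCategoryTagOrder cat [] ++ pvUniversalTagOrder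
      = (pvRulesA cat).map Prod.fst := by
  by_cases h1 : cat = "Academic"
  · subst h1; rfl
  · by_cases h2 : cat = "Hostel"
    · subst h2; rfl
    · by_cases h3 : cat = "Infrastructure"
      · subst h3; rfl
      · by_cases h4 : cat = "Administration"
        · subst h4; rfl
        · have hgetA : PySem.Dict.getD pvCategoryRules cat [] = [] := by
            simp [pvCategoryRules, PySem.Dict.getD, PySem.Dict.get?,
              beq_eq_false_iff_ne.mpr (Ne.symm h1), beq_eq_false_iff_ne.mpr (Ne.symm h2),
              beq_eq_false_iff_ne.mpr (Ne.symm h3), beq_eq_false_iff_ne.mpr (Ne.symm h4)]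
          have hgetO : PySem.Dict.getD pvCategoryTagOrder cat [] = [] := by
            simp [pvCategoryTagOrder, PySem.Dict.getD, PySem.Dict.get?,
              beq_eq_false_iff_ne.mpr (Ne.symm h1), beq_eq_false_iff_ne.mpr (Ne.symm h2),
              beq_eq_false_iff_ne.mpr (Ne.symm h3), beq_eq_false_iff_ne.mpr (Ne.symm h4)]
          rw [pvRulesA, hgetA, hgetO]; rfl

-- filtering the tag list by a per-tag test = mapping fst over the rule-filtered list,
-- when the tests agree rule by rule
lemma pvFilter_map_fst (rules : List (String × List String)) (f : String → Bool)
    (g : (String × List String) → Bool) (h : ∀ r ∈ rules, f r.1 = g r) :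
    (rules.map Prod.fst).filter f = (rules.filter g).map Prod.fst := by
  induction rules with
  | nil => rfl
  | cons r rest ih =>
    simp only [List.map_cons, List.filter_cons, h r (List.mem_cons_self ..)]
    rw [ih (fun x hx => h x (List.mem_cons_of_mem _ hx))]
    by_cases hg : g r = true <;> simp [hg]

-- ===== VERDICT (by name: the statement is the Claim_ definition above) =====
theorem generate_auto_tags_py_spec : Claim_equal_generate_auto_tags_py := by
  intro pt cat _
  unfold Spec_generate_auto_tags_py
  rw [pvA_eq]
  show _ = pvEmit _ [] _
  rw [pvEmit_eq _ _ [] (by simp), List.nil_append, pvOrder_eq,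
    pvFilter_map_fst (pvRulesA cat) _ (pvHit pt) (pvHitSet_cond pt cat)]
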